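-- pv_equiv track=rewrite | github.com/AashishKumarSingh1/Aashish_Kumar_Singh_Python | Python/Python_Day_6/Evil_Number_Upto_n.py | is_Evil
-- ===== SOURCE A (Python) =====
-- def is_Evil(num):
--     list=[]
--     while num!=0:
--         list.append(num%2)
--         num//=2
--
--
--     if ( list.count(1)%2==0):
--         return True
--     else:
--         return False
-- ===== SOURCE B (Python) =====
-- def is_Evil(num):
--     if num == 0:
--         return True
--     return is_Evil(num // 2) == (num % 2 == 0)
-- ===== Notes on version B (the rewrite author's own statement) =====
-- stated objective: simpler
-- what changed: Replaced the iterative bit-list construction plus separate list-count scan by a direct recursion on the halved number that chains the parity through a boolean equality (evil of n equals: evil of the half compared with whether the low bit is clear): no loop, no list, no counter; Pre_ excludes negative num, on which A's while loop never terminates so A returns no value.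
import Mathlib
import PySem

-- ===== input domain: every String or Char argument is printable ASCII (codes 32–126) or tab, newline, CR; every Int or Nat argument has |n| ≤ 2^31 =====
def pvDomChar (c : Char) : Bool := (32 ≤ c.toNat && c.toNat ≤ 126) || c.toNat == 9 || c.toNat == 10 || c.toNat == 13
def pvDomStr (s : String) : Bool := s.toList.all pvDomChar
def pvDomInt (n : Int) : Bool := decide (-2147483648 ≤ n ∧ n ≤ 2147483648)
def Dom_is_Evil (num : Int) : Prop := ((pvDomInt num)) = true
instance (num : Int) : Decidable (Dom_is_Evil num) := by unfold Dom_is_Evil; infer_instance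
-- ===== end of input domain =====

-- B replaces A's bit-list plus separate count scan by a direct recursion on the halved
-- number, chaining the parity through a boolean equality (simpler: no loop, no list, no counter).

-- ===== PORT A =====
-- the 'while num != 0' loop: append num % 2, then num //= 2.
-- On num < 0 the Python loop never terminates (excluded by Pre_); the recursion stops there.
def is_Evil_loop (num : Int) (acc : List Int) : List Int :=
  if 0 < num then
    is_Evil_loop (PySem.Int.floordiv num 2) (acc ++ [PySem.Int.mod num 2])
  else acc
termination_by num.toNat
decreasing_by
  have h2 : PySem.Int.floordiv num 2 = num / 2 := PySem.Int.floordiv_eq_ediv_of_pos (by omega)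
  rw [h2]; omega

def is_Evil (num : Int) : Bool :=
  if PySem.Int.mod (PySem.List.count (is_Evil_loop num []) 1) 2 = 0 then true else false

-- ===== PORT B =====
-- fuel makes the recursion total in Lean (num.toNat + 1 steps always suffice for num ≥ 0,
-- since each step halves num); on num < 0 the Python recursion exceeds the recursion
-- limit (excluded by Pre_), here the fuel runs out.
def is_Evil_alt_go : Nat → Int → Bool
  | 0, _ => true
  | f + 1, num =>
    if num = 0 then true
    else is_Evil_alt_go f (PySem.Int.floordiv num 2) == decide (PySem.Int.mod num 2 = 0)

def is_Evil_alt (num : Int) : Bool := is_Evil_alt_go (num.toNat + 1) num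

-- ===== PRECONDITION & SPEC =====
-- Pre_ excludes negative num: there A's while loop never terminates (num //= 2 stays at -1),
-- so A returns no value (and B's recursion hits Python's recursion limit).
def Pre_is_Evil (num : Int) : Prop := 0 ≤ num
instance (num : Int) : Decidable (Pre_is_Evil num) := by unfold Pre_is_Evil; infer_instance
def pvWitness_is_Evil : Int := (3)

def Spec_is_Evil (num : Int) (out : Bool) : Prop := out = is_Evil_alt num
instance (num : Int) (out : Bool) : Decidable (Spec_is_Evil num out) := by unfold Spec_is_Evil; infer_instance

-- ===== CLAIM (what is proved, stated in full; the proofs are below) =====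
def Claim_equal_is_Evil : Prop := ∀ (num : Int), Dom_is_Evil num → Pre_is_Evil num → Spec_is_Evil num (is_Evil num)

-- ===== LEMMAS AND PROOFS =====

-- popcount on Nat, the common reference both ports are reduced to
def pvPc (n : Nat) : Nat :=
  if n = 0 then 0 else n % 2 + pvPc (n / 2)
decreasing_by exact Nat.div_lt_self (Nat.pos_of_ne_zero (by assumption)) (by omega)

theorem loop_count (n : Nat) : ∀ (num : Int), 0 ≤ num → num.toNat = n → ∀ (acc : List Int),
    PySem.List.count (is_Evil_loop num acc) 1 = PySem.List.count acc 1 + pvPc num.toNat := by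
  induction n using Nat.strong_induction_on with
  | _ n ih =>
    intro num hnn hn acc
    rw [is_Evil_loop]
    by_cases h : 0 < num
    · simp only [h, if_true]
      have h2 : PySem.Int.floordiv num 2 = num / 2 := PySem.Int.floordiv_eq_ediv_of_pos (by omega)
      have hm : PySem.Int.mod num 2 = num % 2 := PySem.Int.mod_eq_emod_of_pos (by omega)
      have hlt : (num / 2).toNat < n := by omega
      rw [h2, ih _ hlt _ (by omega) rfl]
      have hcnt : PySem.List.count (acc ++ [PySem.Int.mod num 2]) 1
          = PySem.List.count acc 1 + (if PySem.Int.mod num 2 = 1 then 1 else 0) := by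
        simp [PySem.List.count, List.count_append, List.count_singleton]
      rw [hcnt]
      conv_rhs => rw [pvPc]
      have hne : num.toNat ≠ 0 := by omega
      simp only [hne, if_false]
      have h1 : (num / 2).toNat = num.toNat / 2 := by omega
      rw [hm]
      rcases Int.emod_two_eq_zero_or_one num with he | he <;>
        · have ht : num.toNat % 2 = (num % 2).toNat := by omega
          rw [he] at ht
          simp [he, h1, ht] <;> omega
    · simp only [h, if_false]
      have : num = 0 := by omega
      subst this
      rw [pvPc]; simp

theorem go_eval (n : Nat) : ∀ (num : Int), 0 ≤ num → num.toNat = n → ∀ (f : Nat), num.toNat ≤ f →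
    is_Evil_alt_go (f + 1) num = decide (pvPc num.toNat % 2 = 0) := by
  induction n using Nat.strong_induction_on with
  | _ n ih =>
    intro num hnn hn f hf
    rw [is_Evil_alt_go]
    by_cases h : num = 0
    · subst h; simp [pvPc]
    · simp only [h, if_false]
      have hpos : 0 < num := by omega
      have h2 : PySem.Int.floordiv num 2 = num / 2 := PySem.Int.floordiv_eq_ediv_of_pos (by omega)
      have hm : PySem.Int.mod num 2 = num % 2 := PySem.Int.mod_eq_emod_of_pos (by omega)
      obtain ⟨f', rfl⟩ : ∃ f', f = f' + 1 := ⟨f - 1, by omega⟩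
      have hlt : (num / 2).toNat < n := by omega
      rw [h2, ih _ hlt _ (by omega) rfl f' (by omega)]
      rw [hm]
      conv_rhs => rw [pvPc]
      have hne : num.toNat ≠ 0 := by omega
      simp only [hne, if_false]
      have h1 : (num / 2).toNat = num.toNat / 2 := by omega
      rw [h1]
      rcases Int.emod_two_eq_zero_or_one num with he | he <;>
        rcases Nat.mod_two_eq_zero_or_one (pvPc (num.toNat / 2)) with ho | ho <;>
        · have ht : num.toNat % 2 = (num % 2).toNat := by omega
          rw [he] at ht
          simp [he, ht, Nat.add_mod, ho]

-- ===== VERDICT (by name: the statement is the Claim_ definition above) =====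
theorem is_Evil_spec : Claim_equal_is_Evil := by
  intro num _ hpre
  unfold Spec_is_Evil is_Evil is_Evil_alt
  rw [loop_count num.toNat num hpre rfl [], go_eval num.toNat num hpre rfl num.toNat (le_refl _)]
  have hm : PySem.Int.mod ((PySem.List.count ([] : List Int) 1 + pvPc num.toNat : Nat) : Int) 2
      = ((PySem.List.count ([] : List Int) 1 + pvPc num.toNat : Nat) : Int) % 2 :=
    PySem.Int.mod_eq_emod_of_pos (by omega)
  rw [hm]
  rcases Nat.mod_two_eq_zero_or_one (pvPc num.toNat) with ho | ho <;>
    · simp [PySem.List.count, ho]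
      omega
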